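-- pv_equiv track=rewrite | github.com/pyista/pythonista | scripts/sorting-algo/python3/utility.py | parse_non_int
-- ===== SOURCE A (Python) =====
-- def parse_non_int(input_string: str) -> list:
--     if input_string is None or input_string is "":
--         return [0]
--     new_string = ""
--     accepted_string = [i for i in '1234567890 ']
--     for i in input_string:
--         if i in accepted_string:
--             new_string += i
--         elif i is ",":
--             new_string += " "
--         else:
--             new_string += ""
--
--     _ret = [int(i) for i in new_string.split(" ") if i is not '']
--     return _ret
-- ===== SOURCE B (Python) =====
-- def parse_non_int(input_string):
--     # Single-pass tokenizer: accumulate the numeric value of the current digit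
--     # run directly; ',' or ' ' flushes it; every other character is ignored.
--     if input_string is None or input_string == "":
--         return [0]
--     result = []
--     cur = None
--     for ch in input_string:
--         if '0' <= ch <= '9':
--             cur = (0 if cur is None else cur) * 10 + (ord(ch) - 48)
--         elif ch == ',' or ch == ' ':
--             if cur is not None:
--                 result.append(cur)
--                 cur = None
--         # any other character is dropped without ending the current run
--     if cur is not None:
--         result.append(cur)
--     return result
-- ===== Notes on version B (the rewrite author's own statement) =====
-- stated objective: faster
-- what changed: Replaces A's two-phase pipeline (build a cleaned string char-by-char with repeated string concatenation, then split it on spaces and int() each non-empty token) with a single-pass tokenizer that keeps the numeric value of the current digit run in an integer accumulator and flushes it on a separator, never materialising intermediate strings.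
import Mathlib
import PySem

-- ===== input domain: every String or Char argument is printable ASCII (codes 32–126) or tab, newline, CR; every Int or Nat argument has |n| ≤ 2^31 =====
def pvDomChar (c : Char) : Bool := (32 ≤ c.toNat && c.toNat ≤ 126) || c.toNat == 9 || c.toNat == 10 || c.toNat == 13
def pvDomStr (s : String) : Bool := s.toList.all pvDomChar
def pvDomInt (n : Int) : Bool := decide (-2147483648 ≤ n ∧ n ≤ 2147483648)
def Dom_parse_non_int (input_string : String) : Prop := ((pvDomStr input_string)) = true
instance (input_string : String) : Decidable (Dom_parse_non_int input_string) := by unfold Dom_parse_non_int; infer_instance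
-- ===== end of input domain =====

-- B replaces A's two-phase filter-then-split pipeline with a single-pass tokenizer
-- carrying an integer accumulator (objective: faster by a constant factor: no intermediate strings).

-- ===== PORT A =====
-- accepted_string = [i for i in '1234567890 ']
def pvAccepted : List Char := ['1', '2', '3', '4', '5', '6', '7', '8', '9', '0', ' ']

-- int(t): ported by hand as the decimal-digit fold; exact for the nonempty
-- all-digit tokens this pipeline feeds it (no sign, no whitespace, no '_').
def pvIntOfDigits (t : List Char) : Int := t.foldl (fun a c => a * 10 + ((c.toNat : Int) - 48)) 0

def parse_non_int (input_string : String) : List Int :=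
  if input_string = "" then [0]
  else
    let new_string : List Char := input_string.toList.foldl
      (fun ns i => if i ∈ pvAccepted then ns ++ [i]
                   else if i = ',' then ns ++ [' ']
                   else ns ++ []) []
    ((PySem.Chars.splitOn new_string [' ']).filter (fun t => t ≠ [])).map pvIntOfDigits

-- ===== PORT B =====
def pvTokLoop : List Char → Option Int → List Int → List Int
  | [], cur, result =>
    match cur with
    | some v => result ++ [v]
    | none => result
  | c :: cs, cur, result =>
    if '0' ≤ c ∧ c ≤ '9' then
      pvTokLoop cs (some ((cur.getD 0) * 10 + ((c.toNat : Int) - 48))) result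
    else if c = ',' ∨ c = ' ' then
      match cur with
      | some v => pvTokLoop cs none (result ++ [v])
      | none => pvTokLoop cs none result
    else pvTokLoop cs cur result

def parse_non_int_alt (input_string : String) : List Int :=
  if input_string = "" then [0] else pvTokLoop input_string.toList none []

-- ===== PRECONDITION & SPEC =====
def Spec_parse_non_int (input_string : String) (out : List Int) : Prop := out = parse_non_int_alt input_string
instance (input_string : String) (out : List Int) : Decidable (Spec_parse_non_int input_string out) := by unfold Spec_parse_non_int; infer_instance

-- ===== CLAIM (what is proved, stated in full; the proofs are below) =====
def Claim_equal_parse_non_int : Prop := ∀ (input_string : String), Dom_parse_non_int input_string → Spec_parse_non_int input_string (parse_non_int input_string)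

-- ===== LEMMAS AND PROOFS =====

-- what one character of A's first loop contributes to new_string
def pvStep (c : Char) : List Char :=
  if c ∈ pvAccepted then [c] else if c = ',' then [' '] else []

theorem pvClean_eq_flatMap (cs : List Char) :
    cs.foldl (fun ns i => if i ∈ pvAccepted then ns ++ [i]
                          else if i = ',' then ns ++ [' ']
                          else ns ++ []) [] = cs.flatMap pvStep := by
  have h : ∀ acc : List Char, cs.foldl (fun ns i => if i ∈ pvAccepted then ns ++ [i]
      else if i = ',' then ns ++ [' '] else ns ++ []) acc = acc ++ cs.flatMap pvStep := by
    intro acc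
    have : (fun (ns : List Char) (i : Char) => if i ∈ pvAccepted then ns ++ [i]
        else if i = ',' then ns ++ [' '] else ns ++ []) = fun ns i => ns ++ pvStep i := by
      funext ns i
      simp only [pvStep]
      split_ifs <;> rfl
    rw [this, PySem.List.foldl_append_eq_flatMap]
  simpa using h []

theorem pvMem_accepted (c : Char) : c ∈ pvAccepted ↔ (('0' ≤ c ∧ c ≤ '9') ∨ c = ' ') := by
  constructor
  · intro h
    simp only [pvAccepted, List.mem_cons, List.not_mem_nil, or_false] at h
    rcases h with h | h | h | h | h | h | h | h | h | h | h <;> subst h <;> simp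
  · rintro (⟨h1, h2⟩ | h)
    · have hv1 : 48 ≤ c.toNat := h1
      have hv2 : c.toNat ≤ 57 := h2
      have hc : c = Char.ofNat c.toNat := (Char.ofNat_toNat c).symm
      interval_cases h : c.toNat <;> rw [hc] <;> decide
    · subst h; decide

theorem pvSplitOn_go_spec (fuel : Nat) :
    ∀ (l cur : List Char) (acc : List (List Char)), l.length < fuel → ' ' ∉ cur →
      PySem.Chars.splitOn.go [' '] fuel l cur acc
        = acc.reverse ++ (cur.reverse ++ l).splitOn ' ' := by
  induction fuel with
  | zero => intro l cur acc h; omega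
  | succ fuel ih =>
    intro l cur acc h hcur
    have hcurfree : ∀ x ∈ cur.reverse, ¬((x == ' ') = true) := by
      intro x hx
      simp only [beq_iff_eq]
      intro hx'
      exact hcur (by simpa [hx'] using (List.mem_reverse.mp hx))
    cases l with
    | nil =>
      rw [PySem.Chars.splitOn.go, List.append_nil, List.splitOn,
        List.splitOnP_eq_single _ _ hcurfree]
      · simp
      · omega
    | cons c rest =>
      by_cases hc : c = ' '
      · subst hc
        rw [PySem.Chars.splitOn.go, if_pos (by simp [List.isPrefixOf])]
        have hdrop : List.drop [' '].length (' ' :: rest) = rest := rfl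
        rw [hdrop, ih rest [] (cur.reverse :: acc) (by simpa using h) (by simp)]
        simp only [List.splitOn, List.reverse_nil, List.nil_append]
        rw [List.splitOnP_first _ _ hcurfree ' ' (by simp) rest]
        simp
      · rw [PySem.Chars.splitOn.go, if_neg (by simp [List.isPrefixOf]; exact fun hx => hc hx.symm)]
        rw [ih rest (c :: cur) acc (by simpa using h)
          (by simp only [List.mem_cons, not_or]; exact ⟨fun hx => hc hx.symm, hcur⟩)]
        simp

theorem pvSplitOn_eq (s : List Char) :
    PySem.Chars.splitOn s [' '] = s.splitOn ' ' := by
  rw [PySem.Chars.splitOn, pvSplitOn_go_spec (s.length + 1) s [] [] (by omega) (by simp)]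
  simp

theorem pvTokLoop_acc (cs : List Char) :
    ∀ (cur : Option Int) (res : List Int), pvTokLoop cs cur res = res ++ pvTokLoop cs cur [] := by
  induction cs with
  | nil => intro cur res; cases cur <;> simp [pvTokLoop]
  | cons c cs ih =>
    intro cur res
    by_cases hd : '0' ≤ c ∧ c ≤ '9'
    · simp only [pvTokLoop, if_pos hd]; exact ih _ _
    · by_cases hs : c = ',' ∨ c = ' '
      · simp only [pvTokLoop, if_neg hd, if_pos hs]
        cases cur with
        | none => exact ih _ _
        | some v =>
          show pvTokLoop cs none (res ++ [v]) = res ++ pvTokLoop cs none ([] ++ [v])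
          rw [ih none (res ++ [v]), ih none ([] ++ [v])]
          simp
      · simp only [pvTokLoop, if_neg hd, if_neg hs]; exact ih _ _

theorem pvDigit_ne_space {c : Char} (h : '0' ≤ c ∧ c ≤ '9') : c ≠ ' ' := by
  rintro rfl
  exact absurd h.1 (by decide)

theorem pvMain (cs : List Char) :
    ∀ pend : List Char, (∀ c ∈ pend, '0' ≤ c ∧ c ≤ '9') →
      (((pend ++ cs.flatMap pvStep).splitOn ' ').filter (fun t => t ≠ [])).map pvIntOfDigits
        = pvTokLoop cs (if pend = [] then none else some (pvIntOfDigits pend)) [] := by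
  induction cs with
  | nil =>
    intro pend hpend
    rw [List.flatMap_nil, List.append_nil, List.splitOn,
      List.splitOnP_eq_single _ _ (fun x hx => by
        simp only [beq_iff_eq]
        exact pvDigit_ne_space (hpend x hx))]
    cases pend with
    | nil => simp [pvTokLoop]
    | cons p ps => simp [pvTokLoop, List.filter, List.map]
  | cons c cs ih =>
    intro pend hpend
    have hpendspace : ∀ x ∈ pend, ¬((x == ' ') = true) := fun x hx => by
      simp only [beq_iff_eq]
      exact pvDigit_ne_space (hpend x hx)
    by_cases hd : '0' ≤ c ∧ c ≤ '9'
    · have hstep : pvStep c = [c] := by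
        simp [pvStep, (pvMem_accepted c).mpr (Or.inl hd)]
      rw [List.flatMap_cons, hstep]
      have : pend ++ [c] ++ cs.flatMap pvStep = pend ++ ([c] ++ cs.flatMap pvStep) := by simp
      rw [← this, ih (pend ++ [c]) (by
        intro x hx
        rcases List.mem_append.mp hx with hx | hx
        · exact hpend x hx
        · simp only [List.mem_singleton] at hx; subst hx; exact hd)]
      have hval : pvIntOfDigits (pend ++ [c])
          = (if pend = [] then (none : Option Int) else some (pvIntOfDigits pend)).getD 0 * 10
            + ((c.toNat : Int) - 48) := by
        cases pend with
        | nil => simp [pvIntOfDigits]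
        | cons p ps => simp [pvIntOfDigits, List.foldl_append]
      simp only [pvTokLoop, if_pos hd]
      rw [if_neg (by simp), hval]
    · by_cases hsep : c = ',' ∨ c = ' '
      · have hstep : pvStep c = [' '] := by
          rcases hsep with h | h <;> subst h <;> decide
        rw [List.flatMap_cons, hstep]
        have : pend ++ ([' '] ++ cs.flatMap pvStep) = pend ++ ' ' :: cs.flatMap pvStep := by simp
        rw [this, List.splitOn, List.splitOnP_first _ _ hpendspace ' ' (by simp) _]
        simp only [pvTokLoop, if_neg hd, if_pos hsep]
        cases pend with
        | nil =>
          show List.map pvIntOfDigits (List.filter (fun t => decide (t ≠ []))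
              ([] :: List.splitOnP (fun x => x == ' ') (List.flatMap pvStep cs)))
            = pvTokLoop cs none []
          have hih := ih [] (by simp)
          simp only [List.nil_append, reduceIte] at hih
          rw [List.splitOn] at hih
          rw [← hih]
          simp
        | cons p ps =>
          show List.map pvIntOfDigits (List.filter (fun t => decide (t ≠ []))
              ((p :: ps) :: List.splitOnP (fun x => x == ' ') (List.flatMap pvStep cs)))
            = pvTokLoop cs none ([] ++ [pvIntOfDigits (p :: ps)])
          rw [pvTokLoop_acc cs none ([] ++ [pvIntOfDigits (p :: ps)])]
          have hih := ih [] (by simp)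
          simp only [List.nil_append, reduceIte] at hih
          rw [List.splitOn] at hih
          rw [← hih]
          simp [List.filter]
      · have hstep : pvStep c = [] := by
          have hna : c ∉ pvAccepted := by
            intro hmem
            rcases (pvMem_accepted c).mp hmem with h | h
            · exact hd h
            · exact hsep (Or.inr h)
          have hnc : ¬(c = ',') := fun h => hsep (Or.inl h)
          simp [pvStep, hna, hnc]
        rw [List.flatMap_cons, hstep, List.nil_append]
        rw [ih pend hpend]
        simp only [pvTokLoop, if_neg hd, if_neg hsep]

-- ===== VERDICT (by name: the statement is the Claim_ definition above) =====
theorem parse_non_int_spec : Claim_equal_parse_non_int := by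
  intro s _
  unfold Spec_parse_non_int parse_non_int parse_non_int_alt
  by_cases hs : s = ""
  · simp [hs]
  · rw [if_neg hs, if_neg hs]
    show ((PySem.Chars.splitOn (s.toList.foldl
        (fun ns i => if i ∈ pvAccepted then ns ++ [i]
                     else if i = ',' then ns ++ [' ']
                     else ns ++ []) []) [' ']).filter (fun t => t ≠ [])).map pvIntOfDigits
      = pvTokLoop s.toList none []
    rw [pvClean_eq_flatMap, pvSplitOn_eq]
    have hmain := pvMain s.toList [] (by simp)
    simpa using hmain
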